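-- pv_equiv track=rewrite | github.com/Mooze34/Data-Structures-S25 | Project_2/extra_credit.py | find_collinear_points
-- ===== SOURCE A (Python) =====
-- import math  # Import math for gcd (needed in the algo)
--
-- def find_collinear_points(points):
--     # Sort the list of points lexicographically (by x, then y)
--     points = sorted(points)
--     n = len(points)
--     # Use a set to store unique groups of collinear points
--     collinear_groups = set()
--
--     # Iterate over all points as the "origin"
--     for i in range(n):
--         origin = points[i]
--         slopes = {}  # Dictionary to map each normalized slope to points sharing that slope with origin
--         # Compare the origin with every other point
--         for j in range(n):
--             if i == j:
--                 continue  # Skip comparing the origin to itself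
--             # Calculate differences in x and y coordinates
--             dx = points[j][0] - origin[0]
--             dy = points[j][1] - origin[1]
--
--             # For vertical lines, set slope to (1, 0)
--             if dx == 0:
--                 slope = (1, 0)
--             # For horizontal lines, set slope to (0, 1)
--             elif dy == 0:
--                 slope = (0, 1)
--             else:
--                 # Compute the greatest common divisor for dx and dy
--                 g = math.gcd(dx, dy)
--                 # Normalize the differences
--                 ndx = dx // g
--                 ndy = dy // g
--                 # Ensure the normalized slope has a positive denominator
--                 if ndx < 0:
--                     ndx, ndy = -ndx, -ndy
--                 # Use a tuple (ndy, ndx) to represent the normalized slope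
--                 slope = (ndy, ndx)
--             # Append the point to the list of points sharing this slope with origin
--             slopes.setdefault(slope, []).append(points[j])
--
--         # For each unique slope, check if enough points are collinear with the origin
--         for slope, same_slope_points in slopes.items():
--             # Group is valid if there are at least 3 points with the same slope (plus the origin makes 4)
--             if len(same_slope_points) >= 3:
--                 # Create a sorted tuple representing the group of collinear points
--                 group = tuple(sorted([origin] + same_slope_points))
--                 # Only add the group if the origin is the smallest point to avoid duplicates
--                 if group[0] == origin:
--                     collinear_groups.add(group)
--     # Return the sorted list of unique collinear groups that have at least 4 points
--     return sorted(collinear_groups)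
-- ===== SOURCE B (Python) =====
-- import math
--
--
-- def _slope(origin, p):
--     # Same slope normalization as the task describes: vertical -> (1, 0),
--     # horizontal -> (0, 1), otherwise reduced (ndy, ndx) with ndx > 0.
--     dx = p[0] - origin[0]
--     dy = p[1] - origin[1]
--     if dx == 0:
--         return (1, 0)
--     if dy == 0:
--         return (0, 1)
--     g = math.gcd(dx, dy)
--     ndx = dx // g
--     ndy = dy // g
--     if ndx < 0:
--         ndx, ndy = -ndx, -ndy
--     return (ndy, ndx)
--
--
-- def find_collinear_points(points):
--     # Sedgewick-style sort-and-scan: per origin, sort the (slope, point)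
--     # pairs and scan consecutive runs of equal slope instead of hashing
--     # slopes into a dictionary.
--     points = sorted(points)
--     groups = set()
--     for i, origin in enumerate(points):
--         pairs = sorted((_slope(origin, p), p) for j, p in enumerate(points) if j != i)
--         k = 0
--         m = len(pairs)
--         while k < m:
--             r = k
--             while r < m and pairs[r][0] == pairs[k][0]:
--                 r += 1
--             if r - k >= 3:
--                 group = tuple(sorted((origin,) + tuple(p for _, p in pairs[k:r])))
--                 if group[0] == origin:
--                     groups.add(group)
--             k = r
--     return sorted(groups)
-- ===== Notes on version B (the rewrite author's own statement) =====
-- stated objective: alternative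
-- what changed: Replaces A's per-origin slope->points hash-bucketing dictionary with a Sedgewick-style sort-and-scan: the (slope, point) pairs are sorted and groups are collected from consecutive runs of equal slope.
import Mathlib
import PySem

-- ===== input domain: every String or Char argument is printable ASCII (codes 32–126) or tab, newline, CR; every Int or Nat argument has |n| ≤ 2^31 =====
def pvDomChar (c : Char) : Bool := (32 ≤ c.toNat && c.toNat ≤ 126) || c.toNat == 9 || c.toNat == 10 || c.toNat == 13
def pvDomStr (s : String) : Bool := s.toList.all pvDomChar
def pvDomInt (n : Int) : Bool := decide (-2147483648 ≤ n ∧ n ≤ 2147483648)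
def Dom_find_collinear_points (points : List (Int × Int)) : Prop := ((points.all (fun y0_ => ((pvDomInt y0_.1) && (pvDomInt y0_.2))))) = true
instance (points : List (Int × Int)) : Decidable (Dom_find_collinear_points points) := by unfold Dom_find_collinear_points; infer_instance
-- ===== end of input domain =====

-- B replaces A's per-origin slope→points dictionary by sort-and-scan over (slope, point)
-- pairs (alternative decomposition, same return value).

-- ===== PORT A =====
-- Python sorts points / groups by value (tuple-lexicographic): these keys name that order.
def pvKeyPt (p : Int × Int) : Lex (Int × Int) := toLex p

def pvKeyGroup (g : List (Int × Int)) : List (Lex (Int × Int)) := g.map toLex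

-- slope normalization, shared verbatim by both Pythons (A has it inline, B as _slope)
def pvSlope (origin p : Int × Int) : Int × Int :=
  let dx := p.1 - origin.1
  let dy := p.2 - origin.2
  if dx = 0 then (1, 0)
  else if dy = 0 then (0, 1)
  else
    let g : Int := Int.gcd dx dy
    let ndx := PySem.Int.floordiv dx g
    let ndy := PySem.Int.floordiv dy g
    if ndx < 0 then (-ndy, -ndx) else (ndy, ndx)

-- the group-emitting body shared by both Pythons: if len >= 3, sort with the origin,
-- add when the origin is the smallest element
def pvEmit (origin : Int × Int) (cg : PySem.Set (List (Int × Int))) (b : List (Int × Int)) :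
    PySem.Set (List (Int × Int)) :=
  if 3 ≤ b.length then
    let group := PySem.List.sorted (origin :: b) pvKeyPt false
    if PySem.List.pyGet? group 0 = some origin then PySem.Set.add cg group else cg
  else cg

-- slopes.setdefault(slope, []).append(points[j])  ported as Dict.modify
def find_collinear_points (points : List (Int × Int)) : List (List (Int × Int)) :=
  let pts := PySem.List.sorted points pvKeyPt false
  let collinear_groups : PySem.Set (List (Int × Int)) :=
    (PySem.List.enumerate pts).foldl (fun cg oi =>
      let origin := oi.2
      let slopes : PySem.Dict (Int × Int) (List (Int × Int)) :=
        (PySem.List.enumerate pts).foldl (fun d jp =>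
          if jp.1 = oi.1 then d
          else d.modify (pvSlope origin jp.2) [] (· ++ [jp.2])) PySem.Dict.empty
      slopes.items.foldl (fun cg sv => pvEmit origin cg sv.2) cg) (PySem.Set.ofList [])
  -- Python compares the group tuples lexicographically: the Lex list order, given explicitly
  @PySem.List.sorted _ _ List.instLinearOrder.toLT LinearOrder.toDecidableLT
    collinear_groups pvKeyGroup false

-- ===== PORT B =====
-- Python sorts the (slope, point) pairs by value: tuple-lexicographic on nested pairs.
def pvKeyPair (q : (Int × Int) × (Int × Int)) : Lex (Lex (Int × Int) × Lex (Int × Int)) :=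
  toLex (toLex q.1, toLex q.2)

-- the two nested while loops of B: peel one maximal run of equal slope, emit, recurse
def pvScanRuns (origin : Int × Int) (cg : PySem.Set (List (Int × Int))) :
    List ((Int × Int) × (Int × Int)) → PySem.Set (List (Int × Int))
  | [] => cg
  | (s, p) :: rest =>
    let run := p :: (rest.takeWhile (fun q => q.1 = s)).map (·.2)
    pvScanRuns origin (pvEmit origin cg run) (rest.dropWhile (fun q => q.1 = s))
  termination_by L => L.length
  decreasing_by
    simp only [List.length_cons]
    exact Nat.lt_succ_of_le (List.length_dropWhile_le _ _)

def find_collinear_points_alt (points : List (Int × Int)) : List (List (Int × Int)) :=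
  let pts := PySem.List.sorted points pvKeyPt false
  let groups : PySem.Set (List (Int × Int)) :=
    (PySem.List.enumerate pts).foldl (fun cg oi =>
      let origin := oi.2
      let pairs := ((PySem.List.enumerate pts).filter (fun jp => jp.1 ≠ oi.1)).map
          (fun jp => (pvSlope origin jp.2, jp.2))
      pvScanRuns origin cg (PySem.List.sorted pairs pvKeyPair false)) (PySem.Set.ofList [])
  -- same explicit lexicographic order on groups as in port A
  @PySem.List.sorted _ _ List.instLinearOrder.toLT LinearOrder.toDecidableLT
    groups pvKeyGroup false

-- ===== PRECONDITION & SPEC =====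
def Spec_find_collinear_points (points : List (Int × Int)) (out : List (List (Int × Int))) : Prop := out = find_collinear_points_alt points
instance (points : List (Int × Int)) (out : List (List (Int × Int))) : Decidable (Spec_find_collinear_points points out) := by unfold Spec_find_collinear_points; infer_instance

-- ===== CLAIM (what is proved, stated in full; the proofs are below) =====
def Claim_equal_find_collinear_points : Prop := ∀ (points : List (Int × Int)), Dom_find_collinear_points points → Spec_find_collinear_points points (find_collinear_points points)

-- ===== LEMMAS AND PROOFS =====

-- the emit body in conditional-add form
def pvCond (origin : Int × Int) (b : List (Int × Int)) : Bool :=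
  decide (3 ≤ b.length) &&
    decide (PySem.List.pyGet? (PySem.List.sorted (origin :: b) pvKeyPt false) 0 = some origin)

def pvGroup (origin : Int × Int) (b : List (Int × Int)) : List (Int × Int) :=
  PySem.List.sorted (origin :: b) pvKeyPt false

lemma pvEmit_eq (origin : Int × Int) (cg : PySem.Set (List (Int × Int))) (b : List (Int × Int)) :
    pvEmit origin cg b = if pvCond origin b then PySem.Set.add cg (pvGroup origin b) else cg := by
  simp only [pvEmit, pvCond, pvGroup]
  by_cases h1 : 3 ≤ b.length
  · simp [h1]
  · simp [h1]

lemma mem_pvEmit (origin : Int × Int) (cg : PySem.Set (List (Int × Int)))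
    (b g : List (Int × Int)) :
    g ∈ pvEmit origin cg b ↔ g ∈ cg ∨ (pvCond origin b ∧ g = pvGroup origin b) := by
  rw [pvEmit_eq]
  split_ifs with h
  · rw [PySem.Set.mem_add]; tauto
  · tauto

lemma nodup_pvEmit (origin : Int × Int) (cg : PySem.Set (List (Int × Int)))
    (b : List (Int × Int)) (h : List.Nodup cg) : List.Nodup (pvEmit origin cg b) := by
  rw [pvEmit_eq]
  split_ifs
  · exact PySem.Set.nodup_add cg _ h
  · exact h

-- the list of (slope, point) pairs both versions build for one origin
def pvPairs (pts : List (Int × Int)) (i : Int) (origin : Int × Int) :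
    List ((Int × Int) × (Int × Int)) :=
  ((PySem.List.enumerate pts).filter (fun jp => jp.1 ≠ i)).map
    (fun jp => (pvSlope origin jp.2, jp.2))

-- generic: membership in a fold of conditional Set.adds
lemma mem_foldl_condAdd {α β : Type} [BEq α] [LawfulBEq α] (L : List β) (c : β → Bool)
    (G : β → α) (cg : PySem.Set α) (g : α) :
    g ∈ L.foldl (fun cg x => if c x then PySem.Set.add cg (G x) else cg) cg ↔
      g ∈ cg ∨ ∃ x ∈ L, c x ∧ g = G x := by
  induction L generalizing cg with
  | nil => simp
  | cons a t ih =>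
    simp only [List.foldl_cons]
    rw [ih]
    split_ifs with h
    · rw [PySem.Set.mem_add]
      constructor
      · rintro (⟨h1 | h1⟩ | h1)
        · exact Or.inl h1
        · exact Or.inr ⟨a, List.mem_cons_self, h, h1⟩
        · obtain ⟨x, hx, hc, hg⟩ := h1
          exact Or.inr ⟨x, List.mem_cons_of_mem _ hx, hc, hg⟩
      · rintro (h1 | ⟨x, hx, hc, hg⟩)
        · exact Or.inl (Or.inl h1)
        · rcases List.mem_cons.mp hx with rfl | hx
          · exact Or.inl (Or.inr hg)
          · exact Or.inr ⟨x, hx, hc, hg⟩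
    · constructor
      · rintro (h1 | ⟨x, hx, hc, hg⟩)
        · exact Or.inl h1
        · exact Or.inr ⟨x, List.mem_cons_of_mem _ hx, hc, hg⟩
      · rintro (h1 | ⟨x, hx, hc, hg⟩)
        · exact Or.inl h1
        · rcases List.mem_cons.mp hx with rfl | hx
          · exact absurd hc h
          · exact Or.inr ⟨x, hx, hc, hg⟩

-- generic: a fold whose step preserves Nodup preserves Nodup
lemma foldl_preserves_nodup {α β : Type} (φ : PySem.Set α → β → PySem.Set α)
    (h : ∀ cg x, List.Nodup cg → List.Nodup (φ cg x)) (L : List β) (cg : PySem.Set α)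
    (hcg : List.Nodup cg) : List.Nodup (L.foldl φ cg) := by
  induction L generalizing cg with
  | nil => exact hcg
  | cons a t ih => exact ih _ (h _ _ hcg)

-- generic: two folds over the same list whose steps transfer membership transfer membership
lemma mem_foldl_iff_of_step {α β : Type} [BEq α] (L : List β)
    (φA φB : PySem.Set α → β → PySem.Set α)
    (h : ∀ x cgA cgB, (∀ g, g ∈ cgA ↔ g ∈ cgB) → ∀ g, g ∈ φA cgA x ↔ g ∈ φB cgB x) :
    ∀ cgA cgB, (∀ g, g ∈ cgA ↔ g ∈ cgB) → ∀ g, g ∈ L.foldl φA cgA ↔ g ∈ L.foldl φB cgB := by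
  induction L with
  | nil => exact fun _ _ h0 => h0
  | cons a t ih => exact fun cgA cgB h0 => ih _ _ (h a _ _ h0)

-- membership in A's per-origin items fold
lemma memA (pts : List (Int × Int)) (i : Int) (origin : Int × Int)
    (cg : PySem.Set (List (Int × Int))) (g : List (Int × Int)) :
    g ∈ (((PySem.List.enumerate pts).foldl (fun d jp =>
          if jp.1 = i then d
          else d.modify (pvSlope origin jp.2) [] (· ++ [jp.2]))
          PySem.Dict.empty).items.foldl (fun cg sv => pvEmit origin cg sv.2) cg)
      ↔ g ∈ cg ∨ ∃ s ∈ (pvPairs pts i origin).map (·.1),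
          pvCond origin (((pvPairs pts i origin).filter (fun q => q.1 = s)).map (·.2)) ∧
          g = pvGroup origin (((pvPairs pts i origin).filter (fun q => q.1 = s)).map (·.2)) := by
  have h1 : (PySem.List.enumerate pts).foldl (fun d jp =>
        if jp.1 = i then d
        else d.modify (pvSlope origin jp.2) [] (· ++ [jp.2])) PySem.Dict.empty
      = (pvPairs pts i origin).foldl
          (fun d q => d.modify q.1 [] (· ++ [q.2])) PySem.Dict.empty := by
    unfold pvPairs
    rw [List.foldl_map, List.foldl_filter]
    congr 1
    funext d jp
    by_cases h : jp.1 = i <;> simp [h]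
  rw [h1]
  have hnd : ((pvPairs pts i origin).foldl
      (fun d q => d.modify q.1 [] (· ++ [q.2])) PySem.Dict.empty).keys.Nodup := by
    have := PySem.Dict.nodup_keys_foldl_modify_key (pvPairs pts i origin) (fun q => q.1) []
      (fun _ q => (· ++ [q.2])) PySem.Dict.empty (by simp [pysem])
    simpa using this
  have hkeys : ((pvPairs pts i origin).foldl
      (fun d q => d.modify q.1 [] (· ++ [q.2])) PySem.Dict.empty).keys
      = PySem.Set.ofList ((pvPairs pts i origin).map (·.1)) := by
    have := PySem.Dict.keys_foldl_modify_key (pvPairs pts i origin) (fun q => q.1) []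
      (fun _ q => (· ++ [q.2])) PySem.Dict.empty
    simpa [PySem.Set.update_nil_left] using this
  have hget : ∀ s, ((pvPairs pts i origin).foldl
      (fun d q => d.modify q.1 [] (· ++ [q.2])) PySem.Dict.empty).getD s []
      = (((pvPairs pts i origin).filter (fun q => q.1 = s)).map (·.2)) := by
    intro s
    have := PySem.Dict.getD_foldl_modify_append (pvPairs pts i origin) PySem.Dict.empty s
    have hf : (pvPairs pts i origin).filter (fun p => p.1 == s)
        = (pvPairs pts i origin).filter (fun q => decide (q.1 = s)) := by
      apply List.filter_congr
      intro x _
      by_cases h : x.1 = s <;> simp [h]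
    simpa [hf] using this
  rw [PySem.Dict.items_eq_map_keys _ hnd [], List.foldl_map]
  have hbody : (fun (cg : PySem.Set (List (Int × Int))) (k : Int × Int) =>
        pvEmit origin cg (((pvPairs pts i origin).foldl
          (fun d q => d.modify q.1 [] (· ++ [q.2])) PySem.Dict.empty).getD k []))
      = (fun cg k =>
          if pvCond origin (((pvPairs pts i origin).filter (fun q => q.1 = k)).map (·.2))
          then PySem.Set.add cg
            (pvGroup origin (((pvPairs pts i origin).filter (fun q => q.1 = k)).map (·.2)))
          else cg) := by
    funext cg k
    rw [hget k, pvEmit_eq]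
  rw [hbody, hkeys, mem_foldl_condAdd]
  simp only [PySem.Set.mem_ofList]

-- in a slope-sorted list, the first run of a slope is its whole slope class
lemma run_split (s : Int × Int) (rest : List ((Int × Int) × (Int × Int)))
    (hs : (rest.map (fun q => toLex q.1)).Pairwise (· ≤ ·))
    (hge : ∀ q ∈ rest, toLex s ≤ toLex q.1) :
    rest.takeWhile (fun q => q.1 = s) = rest.filter (fun q => q.1 = s) ∧
    ∀ q ∈ rest.dropWhile (fun q => q.1 = s), q.1 ≠ s := by
  induction rest with
  | nil => simp
  | cons a t ih =>
    simp only [List.map_cons, List.pairwise_cons] at hs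
    obtain ⟨ha, ht⟩ := hs
    by_cases h : a.1 = s
    · have hge' : ∀ q ∈ t, toLex s ≤ toLex q.1 := by
        intro q hq
        calc toLex s = toLex a.1 := by rw [h]
          _ ≤ toLex q.1 := ha _ (List.mem_map_of_mem hq)
      obtain ⟨h1, h2⟩ := ih ht hge'
      refine ⟨?_, ?_⟩
      · simp [h, h1]
      · simpa [List.dropWhile_cons, h] using h2
    · have hlt : toLex s < toLex a.1 :=
        lt_of_le_of_ne (hge a List.mem_cons_self) (fun he => h (toLex.injective he).symm)
      have hne : ∀ q ∈ a :: t, ¬ (q.1 = s) := by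
        intro q hq
        rcases List.mem_cons.mp hq with rfl | hq
        · exact h
        · intro he
          have h2 := ha _ (List.mem_map_of_mem hq)
          rw [he] at h2
          exact absurd (lt_of_lt_of_le hlt h2) (lt_irrefl _)
      refine ⟨?_, ?_⟩
      · rw [List.takeWhile_cons_of_neg (by simp [h]), List.filter_eq_nil_iff.mpr (by
          intro q hq
          simpa using hne q hq)]
      · rw [List.dropWhile_cons_of_neg (by simp [h])]
        exact hne

-- membership in B's run scan over a slope-sorted pair list
lemma mem_pvScanRuns_aux (origin : Int × Int) (g : List (Int × Int)) :
    ∀ (n : Nat) (L : List ((Int × Int) × (Int × Int))), L.length ≤ n →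
    (L.map (fun q => toLex q.1)).Pairwise (· ≤ ·) →
    ∀ cg : PySem.Set (List (Int × Int)),
    (g ∈ pvScanRuns origin cg L ↔ g ∈ cg ∨ ∃ s ∈ L.map (·.1),
        pvCond origin ((L.filter (fun q => q.1 = s)).map (·.2)) ∧
        g = pvGroup origin ((L.filter (fun q => q.1 = s)).map (·.2))) := by
  intro n
  induction n with
  | zero =>
    intro L hL _ cg
    have : L = [] := List.length_eq_zero_iff.mp (Nat.le_zero.mp hL)
    subst this
    simp [pvScanRuns]
  | succ n ih =>
    intro L hL hs cg
    match L with
    | [] => simp [pvScanRuns]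
    | (s, p) :: rest =>
      simp only [List.map_cons, List.pairwise_cons] at hs
      obtain ⟨ha, ht⟩ := hs
      have hge : ∀ q ∈ rest, toLex s ≤ toLex q.1 := by
        intro q hq
        exact ha _ (List.mem_map_of_mem hq)
      obtain ⟨htake, hdropne⟩ := run_split s rest ht hge
      have hdrop_sorted : ((rest.dropWhile (fun q => q.1 = s)).map
          (fun q => toLex q.1)).Pairwise (· ≤ ·) :=
        ht.sublist ((List.dropWhile_sublist _).map _)
      have hdroplen : (rest.dropWhile (fun q => q.1 = s)).length ≤ n := by
        have h1 := List.length_dropWhile_le (fun q => decide (q.1 = s)) rest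
        simp only [List.length_cons] at hL
        omega
      have hsplit : rest = rest.takeWhile (fun q => q.1 = s) ++
          rest.dropWhile (fun q => q.1 = s) := (List.takeWhile_append_dropWhile).symm
      have htakemem : ∀ q ∈ rest.takeWhile (fun q => q.1 = s), q.1 = s := by
        intro q hq
        simpa using List.mem_takeWhile_imp hq
      -- F1: the first run is the whole slope-s class of L
      have hF1 : p :: ((rest.takeWhile (fun q => q.1 = s)).map (·.2))
          = ((((s, p) :: rest).filter (fun q => q.1 = s)).map (·.2)) := by
        rw [List.filter_cons_of_pos (by simp), List.map_cons, htake]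
      -- F2: for slopes off the run, filtering L = filtering the dropped suffix
      have hF2 : ∀ s', s' ≠ s → (((s, p) :: rest).filter (fun q => q.1 = s'))
          = (rest.dropWhile (fun q => q.1 = s)).filter (fun q => q.1 = s') := by
        intro s' hne
        rw [List.filter_cons_of_neg (by
          simp only [decide_eq_true_eq]
          exact fun h => hne h.symm)]
        conv_lhs => rw [hsplit]
        rw [List.filter_append, List.filter_eq_nil_iff.mpr (by
          intro q hq
          have := htakemem q hq
          simp [this]
          exact fun h => hne h.symm), List.nil_append]
      rw [pvScanRuns]
      rw [ih _ hdroplen hdrop_sorted, mem_pvEmit]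
      constructor
      · rintro ((hg | ⟨hc, hg⟩) | ⟨s', hs', hc, hg⟩)
        · exact Or.inl hg
        · refine Or.inr ⟨s, by simp, ?_, ?_⟩
          · rwa [← hF1]
          · rwa [← hF1]
        · have hs'ne : s' ≠ s := by
            obtain ⟨q, hq, rfl⟩ := List.mem_map.mp hs'
            exact hdropne q hq
          have hmem : s' ∈ (((s, p) :: rest).map (·.1)) := by
            obtain ⟨q, hq, rfl⟩ := List.mem_map.mp hs'
            exact List.mem_map_of_mem (List.mem_cons_of_mem _ ((List.dropWhile_sublist _).mem hq))
          exact Or.inr ⟨s', hmem, by rwa [hF2 s' hs'ne], by rwa [hF2 s' hs'ne]⟩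
      · rintro (hg | ⟨s', hs', hc, hg⟩)
        · exact Or.inl (Or.inl hg)
        · by_cases he : s' = s
          · subst he
            exact Or.inl (Or.inr ⟨by rwa [hF1], by rwa [hF1]⟩)
          · have hmem : s' ∈ ((rest.dropWhile (fun q => q.1 = s)).map (·.1)) := by
              obtain ⟨q, hq, rfl⟩ := List.mem_map.mp hs'
              rcases List.mem_cons.mp hq with rfl | hq'
              · exact absurd rfl he
              · rw [hsplit] at hq'
                rcases List.mem_append.mp hq' with h1 | h1
                · exact absurd (htakemem q h1) he
                · exact List.mem_map_of_mem h1
            exact Or.inr ⟨s', hmem, by rwa [hF2 s' he] at hc, by rwa [hF2 s' he] at hg⟩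

lemma nodup_pvScanRuns_aux (origin : Int × Int) :
    ∀ (n : Nat) (L : List ((Int × Int) × (Int × Int))), L.length ≤ n →
    ∀ cg : PySem.Set (List (Int × Int)), List.Nodup cg →
    List.Nodup (pvScanRuns origin cg L) := by
  intro n
  induction n with
  | zero =>
    intro L hL _ cg
    have : L = [] := List.length_eq_zero_iff.mp (Nat.le_zero.mp hL)
    subst this
    simpa [pvScanRuns] using cg
  | succ n ih =>
    intro L hL cg hcg
    match L with
    | [] => simpa [pvScanRuns] using hcg
    | (s, p) :: rest =>
      rw [pvScanRuns]
      refine ih _ ?_ _ (nodup_pvEmit _ _ _ hcg)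
      have h1 := List.length_dropWhile_le (fun q => decide (q.1 = s)) rest
      simp only [List.length_cons] at hL
      omega

lemma pvKeyPt_injective : Function.Injective pvKeyPt := fun _ _ h => toLex.injective h

lemma pvGroup_perm (origin : Int × Int) {b b' : List (Int × Int)} (h : b.Perm b') :
    pvGroup origin b = pvGroup origin b' :=
  PySem.List.sorted_eq_sorted_of_perm _ _ pvKeyPt pvKeyPt_injective (h.cons origin)

lemma pvCond_perm (origin : Int × Int) {b b' : List (Int × Int)} (h : b.Perm b') :
    pvCond origin b = pvCond origin b' := by
  have hg : PySem.List.sorted (origin :: b) pvKeyPt false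
      = PySem.List.sorted (origin :: b') pvKeyPt false := pvGroup_perm origin h
  unfold pvCond
  rw [h.length_eq, hg]

-- membership in B's per-origin sorted run scan, in the same terms as memA
lemma memB (pts : List (Int × Int)) (i : Int) (origin : Int × Int)
    (cg : PySem.Set (List (Int × Int))) (g : List (Int × Int)) :
    g ∈ pvScanRuns origin cg (PySem.List.sorted (pvPairs pts i origin) pvKeyPair false) ↔
      g ∈ cg ∨ ∃ s ∈ (pvPairs pts i origin).map (·.1),
        pvCond origin (((pvPairs pts i origin).filter (fun q => q.1 = s)).map (·.2)) ∧
        g = pvGroup origin (((pvPairs pts i origin).filter (fun q => q.1 = s)).map (·.2)) := by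
  have hperm : (PySem.List.sorted (pvPairs pts i origin) pvKeyPair false).Perm
      (pvPairs pts i origin) := PySem.List.sorted_perm _ _ _
  have hsorted : ((PySem.List.sorted (pvPairs pts i origin) pvKeyPair false).map
      (fun q => toLex q.1)).Pairwise (· ≤ ·) := by
    have h := PySem.List.sorted_pairwise (pvPairs pts i origin) pvKeyPair
    rw [List.pairwise_map]
    refine h.imp ?_
    intro a b hab
    rcases Prod.Lex.le_iff.mp hab with h1 | ⟨h1, _⟩
    · exact le_of_lt h1
    · exact le_of_eq h1
  rw [mem_pvScanRuns_aux origin g (PySem.List.sorted (pvPairs pts i origin) pvKeyPair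
    false).length _ le_rfl hsorted cg]
  refine or_congr Iff.rfl (exists_congr fun s => ?_)
  have hfil : (((PySem.List.sorted (pvPairs pts i origin) pvKeyPair false).filter
        (fun q => q.1 = s)).map (·.2)).Perm
      (((pvPairs pts i origin).filter (fun q => q.1 = s)).map (·.2)) :=
    (hperm.filter _).map _
  refine and_congr ((hperm.map _).mem_iff)
    (and_congr (by rw [pvCond_perm origin hfil]) ?_)
  rw [pvGroup_perm origin hfil]

-- the per-origin steps of the two ports, as named functions (definitionally the port bodies)
def pvStepA (pts : List (Int × Int)) (cg : PySem.Set (List (Int × Int)))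
    (oi : Int × (Int × Int)) : PySem.Set (List (Int × Int)) :=
  ((PySem.List.enumerate pts).foldl (fun d jp =>
      if jp.1 = oi.1 then d
      else d.modify (pvSlope oi.2 jp.2) [] (· ++ [jp.2])) PySem.Dict.empty).items.foldl
    (fun cg sv => pvEmit oi.2 cg sv.2) cg

def pvStepB (pts : List (Int × Int)) (cg : PySem.Set (List (Int × Int)))
    (oi : Int × (Int × Int)) : PySem.Set (List (Int × Int)) :=
  pvScanRuns oi.2 cg (PySem.List.sorted (pvPairs pts oi.1 oi.2) pvKeyPair false)

theorem find_collinear_points_spec : Claim_equal_find_collinear_points := by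
  intro points _
  unfold Spec_find_collinear_points
  have hA : find_collinear_points points
      = @PySem.List.sorted _ _ List.instLinearOrder.toLT LinearOrder.toDecidableLT
          ((PySem.List.enumerate (PySem.List.sorted points pvKeyPt
          false)).foldl (pvStepA (PySem.List.sorted points pvKeyPt false))
          (PySem.Set.ofList [])) pvKeyGroup false := rfl
  have hB : find_collinear_points_alt points
      = @PySem.List.sorted _ _ List.instLinearOrder.toLT LinearOrder.toDecidableLT
          ((PySem.List.enumerate (PySem.List.sorted points pvKeyPt
          false)).foldl (pvStepB (PySem.List.sorted points pvKeyPt false))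
          (PySem.Set.ofList [])) pvKeyGroup false := rfl
  rw [hA, hB]
  set pts := PySem.List.sorted points pvKeyPt false with hpts
  have hndA : List.Nodup ((PySem.List.enumerate pts).foldl (pvStepA pts)
      (PySem.Set.ofList [])) := by
    refine foldl_preserves_nodup _ ?_ _ _ (PySem.Set.nodup_ofList [])
    intro cg oi hcg
    refine foldl_preserves_nodup _ ?_ _ _ hcg
    intro cg sv h
    exact nodup_pvEmit oi.2 cg sv.2 h
  have hndB : List.Nodup ((PySem.List.enumerate pts).foldl (pvStepB pts)
      (PySem.Set.ofList [])) := by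
    refine foldl_preserves_nodup _ ?_ _ _ (PySem.Set.nodup_ofList [])
    intro cg oi hcg
    exact nodup_pvScanRuns_aux oi.2 _ _ le_rfl cg hcg
  have hmem : ∀ g, g ∈ (PySem.List.enumerate pts).foldl (pvStepA pts) (PySem.Set.ofList [])
      ↔ g ∈ (PySem.List.enumerate pts).foldl (pvStepB pts) (PySem.Set.ofList []) := by
    refine mem_foldl_iff_of_step _ _ _ ?_ _ _ (fun g => Iff.rfl)
    intro oi cgA cgB h0 g
    exact Iff.trans (memA pts oi.1 oi.2 cgA g)
      (Iff.trans (or_congr (h0 g) Iff.rfl) (memB pts oi.1 oi.2 cgB g).symm)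
  exact PySem.List.sorted_eq_sorted_of_perm _ _ pvKeyGroup
    (fun a b h => List.map_injective_iff.mpr toLex.injective h)
    ((List.perm_ext_iff_of_nodup hndA hndB).mpr hmem)
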